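-- pv_equiv track=rewrite | github.com/Park-Minjoo/CODINGTEST_STUDY | Two Pointers/블로그/ksy.py | calculate_interval_sum
-- ===== SOURCE A (Python) =====
-- def calculate_interval_sum(total_days, x, visitor_nums):
--     count = 0
--     left_pointer = 0
--     right_pointer = 0
--     current_visitor_sum = 0
--     max_visitor_nums = 0
--
--     while right_pointer < total_days:
--         current_visitor_sum += visitor_nums[right_pointer]
--         window_size = right_pointer - left_pointer + 1
--
--         if window_size < x:
--             right_pointer += 1
--             continue
--
--         if window_size == x:
--             if max_visitor_nums < current_visitor_sum:
--                 max_visitor_nums = current_visitor_sum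
--                 count = 1
--             elif max_visitor_nums == current_visitor_sum:
--                 count += 1
--
--         current_visitor_sum -= visitor_nums[left_pointer]
--         left_pointer += 1
--         right_pointer += 1
--
--     return max_visitor_nums, count
-- ===== SOURCE B (Python) =====
-- def calculate_interval_sum(total_days, x, visitor_nums):
--     # prefix-sum re-implementation: one pass to build prefix sums, one pass over window starts
--     prefix = [0]
--     total = 0
--     for val in visitor_nums[:total_days]:
--         total += val
--         prefix.append(total)
--     max_sum = 0
--     count = 0
--     if 1 <= x <= total_days:
--         for i in range(total_days - x + 1):
--             s = prefix[i + x] - prefix[i]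
--             if s > max_sum:
--                 max_sum = s
--                 count = 1
--             elif s == max_sum:
--                 count += 1
--     return max_sum, count
-- ===== Notes on version B (the rewrite author's own statement) =====
-- stated objective: alternative
-- what changed: Replaced A's single two-pointer sliding-window loop (running sum maintained by add/subtract with an explicit warm-up phase) by a prefix-sum array built in one pass plus a scan over window starts that computes each window sum as a difference of two prefix sums; degenerate x (x<1 or x>total_days) is handled by a closed guard instead of falling through the loop.
import Mathlib
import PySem

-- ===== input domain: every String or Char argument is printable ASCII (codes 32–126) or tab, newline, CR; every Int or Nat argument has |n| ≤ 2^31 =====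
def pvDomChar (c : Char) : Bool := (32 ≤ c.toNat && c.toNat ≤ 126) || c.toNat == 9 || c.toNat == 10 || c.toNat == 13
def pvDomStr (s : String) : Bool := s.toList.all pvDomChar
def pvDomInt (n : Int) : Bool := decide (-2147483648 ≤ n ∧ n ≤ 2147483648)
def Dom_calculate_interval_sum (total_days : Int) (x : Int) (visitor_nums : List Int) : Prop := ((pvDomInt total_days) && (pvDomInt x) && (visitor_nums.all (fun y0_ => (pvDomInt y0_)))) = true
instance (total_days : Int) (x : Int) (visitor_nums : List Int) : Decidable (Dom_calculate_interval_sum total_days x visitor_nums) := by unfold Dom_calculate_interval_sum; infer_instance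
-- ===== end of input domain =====

-- B replaces A's two-pointer sliding window by a prefix-sum array scanned over window starts (alternative decomposition, same cost).

-- ===== PORT A =====
-- A's while-loop; fuel = number of remaining iterations (right_pointer counts up to total_days).
-- The 'none' branches of pyGet? are Python's IndexError (outside Pre_).
def pvALoop (total_days x : Int) (v : List Int)
    (count left right cur mx : Int) : Nat → Int × Int
  | 0 => (mx, count)
  | fuel + 1 =>
    if right < total_days then
      match PySem.List.pyGet? v right with
      | none => (mx, count)
      | some vr =>
        let cur2 := cur + vr
        let ws := right - left + 1
        if ws < x then pvALoop total_days x v count left (right + 1) cur2 mx fuel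
        else
          let st : Int × Int :=
            if ws = x then
              (if mx < cur2 then (cur2, 1)
               else if mx = cur2 then (mx, count + 1)
               else (mx, count))
            else (mx, count)
          match PySem.List.pyGet? v left with
          | none => st
          | some vl =>
            pvALoop total_days x v st.2 (left + 1) (right + 1) (cur2 - vl) st.1 fuel
    else (mx, count)

def calculate_interval_sum (total_days : Int) (x : Int) (visitor_nums : List Int) : Int × Int :=
  pvALoop total_days x visitor_nums 0 0 0 0 0 total_days.toNat

-- ===== PORT B =====
def calculate_interval_sum_alt (total_days : Int) (x : Int) (visitor_nums : List Int) : Int × Int :=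
  let pv := PySem.List.slice visitor_nums none (some total_days)   -- visitor_nums[:total_days]
  let pr := pv.foldl (fun (st : List Int × Int) val => (st.1 ++ [st.2 + val], st.2 + val)) ([0], 0)
  let prefixSums := pr.1
  if 1 ≤ x ∧ x ≤ total_days then
    (PySem.List.pyRange 0 (total_days - x + 1) 1).foldl
      (fun (st : Int × Int) i =>
        let s := PySem.List.pyGetD prefixSums (i + x) 0 - PySem.List.pyGetD prefixSums i 0
        if st.1 < s then (s, 1) else if st.1 = s then (st.1, st.2 + 1) else st)
      (0, 0)
  else (0, 0)

-- ===== PRECONDITION & SPEC =====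
-- Pre_ excludes exactly the inputs where A raises IndexError: total_days exceeding len(visitor_nums).
def Pre_calculate_interval_sum (total_days : Int) (x : Int) (visitor_nums : List Int) : Prop :=
  total_days ≤ (visitor_nums.length : Int)
instance (total_days : Int) (x : Int) (visitor_nums : List Int) : Decidable (Pre_calculate_interval_sum total_days x visitor_nums) := by unfold Pre_calculate_interval_sum; infer_instance

def pvWitness_calculate_interval_sum : Int × Int × List Int := (3, 2, [1, 4, 2])

def Spec_calculate_interval_sum (total_days : Int) (x : Int) (visitor_nums : List Int) (out : Int × Int) : Prop := out = calculate_interval_sum_alt total_days x visitor_nums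
instance (total_days : Int) (x : Int) (visitor_nums : List Int) (out : Int × Int) : Decidable (Spec_calculate_interval_sum total_days x visitor_nums out) := by unfold Spec_calculate_interval_sum; infer_instance

-- ===== CLAIM (what is proved, stated in full; the proofs are below) =====
def Claim_equal_calculate_interval_sum : Prop := ∀ (total_days : Int) (x : Int) (visitor_nums : List Int), Dom_calculate_interval_sum total_days x visitor_nums → Pre_calculate_interval_sum total_days x visitor_nums → Spec_calculate_interval_sum total_days x visitor_nums (calculate_interval_sum total_days x visitor_nums)

-- ===== LEMMAS AND PROOFS =====

-- the max/count update both programs perform on one window sum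
def pvStep (st : Int × Int) (s : Int) : Int × Int :=
  if st.1 < s then (s, 1) else if st.1 = s then (st.1, st.2 + 1) else st

def pvW (v : List Int) (xN l : Nat) : Int := ((v.drop l).take xN).sum

theorem pvALoop_deg_low (td x : Int) (v : List Int) (hx : x ≤ 0)
    (hlen : td ≤ (v.length : Int)) :
    ∀ (fuel : Nat) (l : Nat) (cur c mx : Int), l + fuel = td.toNat →
      pvALoop td x v c l l cur mx fuel = (mx, c) := by
  intro fuel
  induction fuel with
  | zero => intro l cur c mx h; simp [pvALoop]
  | succ n ih =>
    intro l cur c mx h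
    have hl : (l : Int) < td := by omega
    have hlen' : l < v.length := by omega
    have h1 : ¬((l : Int) - l + 1 < x) := by omega
    have h2 : ¬((l : Int) - l + 1 = x) := by omega
    simp only [pvALoop, hl, if_true, PySem.List.pyGet?_natCast,
      List.getElem?_eq_getElem hlen', h1, h2, if_false]
    have hc : ((l : Int) + 1) = ((l + 1 : Nat) : Int) := by push_cast; ring
    rw [hc]
    exact ih (l + 1) _ c mx (by omega)

theorem pvALoop_deg_high (td x : Int) (v : List Int) (hx : td < x)
    (hlen : td ≤ (v.length : Int)) :
    ∀ (fuel : Nat) (r : Nat) (cur c mx : Int), r + fuel = td.toNat →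
      pvALoop td x v c 0 r cur mx fuel = (mx, c) := by
  intro fuel
  induction fuel with
  | zero => intro r cur c mx h; simp [pvALoop]
  | succ n ih =>
    intro r cur c mx h
    have hr : (r : Int) < td := by omega
    have hlen' : r < v.length := by omega
    have h1 : ((r : Int) - 0 + 1 < x) := by omega
    simp only [pvALoop, hr, if_true, PySem.List.pyGet?_natCast,
      List.getElem?_eq_getElem hlen', h1]
    have hc : ((r : Int) + 1) = ((r + 1 : Nat) : Int) := by push_cast; ring
    rw [hc]
    exact ih (r + 1) _ c mx (by omega)

theorem pvW_last (v : List Int) (m l : Nat) (h2 : l + m < v.length) :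
    pvW v (m + 1) l = ((v.drop l).take m).sum + v[l + m] := by
  unfold pvW
  rw [List.take_succ]
  have hgd : (v.drop l)[m]? = some v[l + m] := by
    rw [List.getElem?_drop, List.getElem?_eq_getElem h2]
  simp [hgd]

theorem pvW_head (v : List Int) (xN l : Nat) (h1 : 1 ≤ xN) (h2 : l < v.length) :
    pvW v xN l = v[l] + ((v.drop (l + 1)).take (xN - 1)).sum := by
  obtain ⟨m, rfl⟩ : ∃ m, xN = m + 1 := ⟨xN - 1, by omega⟩
  unfold pvW
  rw [List.drop_eq_getElem_cons h2, List.take_succ_cons]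
  simp

theorem pvALoop_steady (td x : Int) (v : List Int) (hx : 1 ≤ x) (hxtd : x ≤ td)
    (hlen : td ≤ (v.length : Int)) :
    ∀ (n l : Nat) (c mx : Int), l + n + x.toNat = td.toNat + 1 →
      pvALoop td x v c l ((l + x.toNat - 1 : Nat) : Int) (((v.drop l).take (x.toNat - 1)).sum) mx
        (td.toNat - (l + x.toNat - 1)) =
      List.foldl pvStep (mx, c) ((List.range n).map (fun j => pvW v x.toNat (l + j))) := by
  intro n
  induction n with
  | zero =>
    intro l c mx h
    have h0 : td.toNat - (l + x.toNat - 1) = 0 := by omega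
    rw [h0]
    simp [pvALoop]
  | succ n ih =>
    intro l c mx h
    have hfuel : td.toNat - (l + x.toNat - 1) = n + 1 := by omega
    rw [hfuel]
    have hr : ((l + x.toNat - 1 : Nat) : Int) < td := by omega
    have hlenr : l + x.toNat - 1 < v.length := by omega
    have hlenl : l < v.length := by omega
    have h1 : ¬(((l + x.toNat - 1 : Nat) : Int) - l + 1 < x) := by omega
    have h2 : (((l + x.toNat - 1 : Nat) : Int) - l + 1 = x) := by omega
    simp only [pvALoop, hr, if_true, PySem.List.pyGet?_natCast,
      List.getElem?_eq_getElem hlenr, List.getElem?_eq_getElem hlenl,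
      h1, if_false, h2, eq_self_iff_true, if_true, lt_self_iff_false]
    have hidx : l + x.toNat - 1 = l + (x.toNat - 1) := by omega
    have hcur : ((v.drop l).take (x.toNat - 1)).sum + v[l + x.toNat - 1]'hlenr = pvW v x.toNat l := by
      have h' := pvW_last v (x.toNat - 1) l (by omega)
      rw [show x.toNat - 1 + 1 = x.toNat from by omega] at h'
      rw [h']
      simp only [hidx]
    rw [hcur]
    have hsub : pvW v x.toNat l - v[l]'hlenl = ((v.drop (l + 1)).take (x.toNat - 1)).sum := by
      rw [pvW_head v x.toNat l (by omega) hlenl]; ring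
    rw [hsub]
    have hst : (if mx < pvW v x.toNat l then (pvW v x.toNat l, 1)
        else if mx = pvW v x.toNat l then (mx, c + 1) else (mx, c)) = pvStep (mx, c) (pvW v x.toNat l) := rfl
    rw [hst]
    have hc1 : ((l : Int) + 1) = ((l + 1 : Nat) : Int) := by push_cast; ring
    have hc2 : (((l + x.toNat - 1 : Nat) : Int) + 1) = (((l + 1) + x.toNat - 1 : Nat) : Int) := by omega
    rw [hc1, hc2]
    have hih := ih (l + 1) (pvStep (mx, c) (pvW v x.toNat l)).2 (pvStep (mx, c) (pvW v x.toNat l)).1 (by omega)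
    rw [show td.toNat - ((l + 1) + x.toNat - 1) = n from by omega] at hih
    rw [hih]
    rw [List.range_succ_eq_map, List.map_cons, List.foldl_cons, List.map_map]
    simp only [Nat.add_zero]
    congr 1
    apply List.map_congr_left
    intro j _
    simp only [Function.comp]
    congr 1
    omega

theorem pvALoop_grow (td x : Int) (v : List Int) (hx : 1 ≤ x) (hxtd : x ≤ td)
    (hlen : td ≤ (v.length : Int)) :
    ∀ (k j : Nat) (c mx : Int), j + k = x.toNat - 1 →
      pvALoop td x v c 0 (j : Int) ((v.take j).sum) mx (td.toNat - j) =
      List.foldl pvStep (mx, c)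
        ((List.range (td.toNat - x.toNat + 1)).map (fun i => pvW v x.toNat i)) := by
  intro k
  induction k with
  | zero =>
    intro j c mx h
    have hj : j = x.toNat - 1 := by omega
    subst hj
    have hs := pvALoop_steady td x v hx hxtd hlen (td.toNat - x.toNat + 1) 0 c mx (by omega)
    simp only [Nat.zero_add, List.drop_zero, Nat.cast_zero, zero_add] at hs
    exact hs
  | succ k ih =>
    intro j c mx h
    rw [show td.toNat - j = (td.toNat - (j + 1)) + 1 from by omega]
    have hr : (j : Int) < td := by omega
    have hlenj : j < v.length := by omega
    have hlt : ((j : Int) - 0 + 1 < x) := by omega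
    simp only [pvALoop, hr, if_true, PySem.List.pyGet?_natCast,
      List.getElem?_eq_getElem hlenj, hlt]
    have hc : (v.take j).sum + v[j]'hlenj = (v.take (j + 1)).sum :=
      Eq.symm (List.sum_take_succ v j hlenj)
    rw [hc, show ((j : Int) + 1) = ((j + 1 : Nat) : Int) from by push_cast; ring]
    exact ih (j + 1) c mx (by omega)

theorem pvA_main (td x : Int) (v : List Int) (hx : 1 ≤ x) (hxtd : x ≤ td)
    (hlen : td ≤ (v.length : Int)) :
    calculate_interval_sum td x v =
      List.foldl pvStep (0, 0)
        ((List.range (td.toNat - x.toNat + 1)).map (fun i => pvW v x.toNat i)) := by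
  unfold calculate_interval_sum
  have hg := pvALoop_grow td x v hx hxtd hlen (x.toNat - 1) 0 0 0 (by omega)
  simpa using hg

theorem pvPrefixFold (xs : List Int) : ∀ (p0 : List Int) (t0 : Int),
    xs.foldl (fun (st : List Int × Int) val => (st.1 ++ [st.2 + val], st.2 + val)) (p0, t0)
    = (p0 ++ (List.range xs.length).map (fun i => t0 + (xs.take (i + 1)).sum), t0 + xs.sum) := by
  induction xs with
  | nil => simp
  | cons a tl ih =>
    intro p0 t0
    simp only [List.foldl_cons]
    rw [ih (p0 ++ [t0 + a]) (t0 + a)]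
    simp only [List.length_cons, List.range_succ_eq_map, List.map_cons, List.map_map,
      List.sum_cons, List.append_assoc]
    rw [Prod.mk.injEq]
    constructor
    · congr 1
      rw [List.singleton_append]
      congr 1
      · simp
      · apply List.map_congr_left
        intro i _
        simp only [Function.comp, List.take_succ_cons, List.sum_cons]
        ring
    · ring

theorem pvPrefix_getD (pv : List Int) (k : Nat) (hk : k ≤ pv.length) :
    ([0] ++ (List.range pv.length).map (fun i => 0 + (pv.take (i + 1)).sum)).getD k 0
      = (pv.take k).sum := by
  cases k with
  | zero => simp
  | succ k =>
    have hk' : k < pv.length := by omega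
    simp [List.getD, List.getElem?_map, List.getElem?_range, hk']

theorem pvB_main (td x : Int) (v : List Int) (hx : 1 ≤ x) (hxtd : x ≤ td)
    (hlen : td ≤ (v.length : Int)) :
    calculate_interval_sum_alt td x v =
      List.foldl pvStep (0, 0)
        ((List.range (td.toNat - x.toNat + 1)).map (fun i => pvW v x.toNat i)) := by
  unfold calculate_interval_sum_alt
  simp only [if_pos (And.intro hx hxtd)]
  rw [show td = ((td.toNat : Nat) : Int) from by omega, PySem.List.slice_to_natCast]
  set pv := v.take td.toNat with hpv
  have hpvlen : pv.length = td.toNat := by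
    rw [hpv, List.length_take]; omega
  rw [pvPrefixFold pv [0] 0]
  rw [show ((td.toNat : Nat) : Int) - x + 1 = ((td.toNat - x.toNat + 1 : Nat) : Int) from by omega]
  rw [PySem.List.pyRange_zero_natCast]
  simp only [Int.toNat_natCast]
  rw [List.foldl_map, List.foldl_map]
  apply PySem.List.foldl_congr_mem
  intro acc i hi
  have hi' : i < td.toNat - x.toNat + 1 := List.mem_range.mp hi
  have hix : i + x.toNat ≤ td.toNat := by omega
  have h1 : ((i : Nat) : Int) + x = ((i + x.toNat : Nat) : Int) := by omega
  rw [h1, PySem.List.pyGetD_natCast, PySem.List.pyGetD_natCast]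
  rw [pvPrefix_getD pv (i + x.toNat) (by omega), pvPrefix_getD pv i (by omega)]
  have htk : ∀ (k : Nat), k ≤ td.toNat → pv.take k = v.take k := by
    intro k hk
    rw [hpv, List.take_take, min_eq_left hk]
  rw [htk (i + x.toNat) hix, htk i (by omega)]
  have hs : (v.take (i + x.toNat)).sum - (v.take i).sum = pvW v x.toNat i := by
    rw [List.take_add, List.sum_append]; unfold pvW; ring
  rw [hs]
  rfl

-- ===== VERDICT (by name: the statement is the Claim_ definition above) =====
theorem calculate_interval_sum_spec : Claim_equal_calculate_interval_sum := by
  intro td x v _hd hpre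
  unfold Spec_calculate_interval_sum
  by_cases hx : 1 ≤ x ∧ x ≤ td
  · rw [pvA_main td x v hx.1 hx.2 hpre, pvB_main td x v hx.1 hx.2 hpre]
  · have hB : calculate_interval_sum_alt td x v = (0, 0) := by
      simp [calculate_interval_sum_alt, hx]
    rw [hB]
    unfold calculate_interval_sum
    rcases lt_or_ge x 1 with h1 | h1
    · exact pvALoop_deg_low td x v (by omega) hpre td.toNat 0 0 0 0 (by omega)
    · exact pvALoop_deg_high td x v (by omega) hpre td.toNat 0 0 0 0 (by omega)
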